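-- pv_equiv track=rewrite | github.com/uldissturms/mit-600 | 600/sixth.py | pick_best_word_faster
-- ===== SOURCE A (Python) =====
-- def flatten(list):
--     return [item for sublist in list for item in sublist]
--
-- def dict_to_sorted_list(dict):
--     return flatten([[key] * dict[key] for key in sorted(dict.keys())])
--
-- def pick_best_word_faster(hand, rearranged_word_list):
--     sorted_hand = ''.join(dict_to_sorted_list(hand))
--     length = len(sorted_hand)
--
--     for size in range(length, 0, -1):
--         for offset in range(0, length - size + 1):
--             candidate = sorted_hand[offset:(size + offset)]
--             if candidate in rearranged_word_list:
--                 return rearranged_word_list[candidate]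
--
--     return '.'
-- ===== SOURCE B (Python) =====
-- def pick_best_word_faster(hand, rearranged_word_list):
--     items = []
--     for key in sorted(hand.keys()):
--         items.extend([key] * hand[key])
--     sorted_hand = ''.join(items)
--
--     # scan the dictionary once instead of the substring grid:
--     # the winner is the key with the lexicographically largest (length, -first_offset)
--     best = None  # ((length, -offset), word)
--     for key, word in rearranged_word_list.items():
--         if len(key) >= 1:
--             offset = sorted_hand.find(key)
--             if offset >= 0:
--                 rank = (len(key), -offset)
--                 if best is None or best[0] < rank:
--                     best = (rank, word)
--     return best[1] if best is not None else '.'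
-- ===== Notes on version B (the rewrite author's own statement) =====
-- stated objective: alternative
-- what changed: Instead of enumerating all substrings of the sorted hand longest-first and probing the dictionary for each, B makes one pass over the dictionary entries, computing each key's first offset in the sorted hand with str.find and keeping the running maximum under the (length, -offset) order, which reproduces A's longest-then-leftmost choice.
import Mathlib
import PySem

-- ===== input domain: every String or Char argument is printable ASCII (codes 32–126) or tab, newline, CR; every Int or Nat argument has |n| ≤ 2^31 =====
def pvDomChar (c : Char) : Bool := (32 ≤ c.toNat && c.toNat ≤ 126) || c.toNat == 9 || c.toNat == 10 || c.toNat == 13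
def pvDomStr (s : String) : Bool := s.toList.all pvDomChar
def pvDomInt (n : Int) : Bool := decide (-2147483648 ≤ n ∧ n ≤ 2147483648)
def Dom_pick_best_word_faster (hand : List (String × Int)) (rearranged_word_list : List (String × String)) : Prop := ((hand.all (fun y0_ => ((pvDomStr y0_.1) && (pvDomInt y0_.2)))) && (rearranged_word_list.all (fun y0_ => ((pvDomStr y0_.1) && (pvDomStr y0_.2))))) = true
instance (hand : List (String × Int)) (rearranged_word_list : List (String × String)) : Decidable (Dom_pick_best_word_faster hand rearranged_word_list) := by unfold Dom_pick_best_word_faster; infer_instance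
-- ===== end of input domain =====

-- B replaces A's longest-first scan over all substrings of the sorted hand by a single pass
-- over the dictionary entries keeping the (length, -first_offset)-maximal matching key (alternative algorithm, same results).


-- ===== PORT A =====
def pvFlatten {α : Type} (l : List (List α)) : List α := l.flatMap (fun sublist => sublist)

def pvDictToSortedList (d : PySem.Dict String Int) : List String :=
  pvFlatten ((PySem.List.sorted d.keys (fun k => k) false).map (fun key => PySem.List.pyRepeat [key] (d.getD key 0)))

def pvInnerA (rwl : PySem.Dict String String) (sorted_hand : String) (size : Int) : List Int → Option String
  | [] => none
  | offset :: rest =>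
    let candidate := PySem.Str.slice sorted_hand (some offset) (some (size + offset))
    if rwl.contains candidate then some (rwl.getD candidate "") else pvInnerA rwl sorted_hand size rest

def pvOuterA (rwl : PySem.Dict String String) (sorted_hand : String) (length : Int) : List Int → Option String
  | [] => none
  | size :: sizes =>
    match pvInnerA rwl sorted_hand size (PySem.List.pyRange 0 (length - size + 1) 1) with
    | some w => some w
    | none => pvOuterA rwl sorted_hand length sizes

def pick_best_word_faster (hand : List (String × Int)) (rearranged_word_list : List (String × String)) : String :=
  let d := PySem.Dict.ofList rearranged_word_list
  let sorted_hand := PySem.Str.join "" (pvDictToSortedList (PySem.Dict.ofList hand))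
  let length := PySem.Str.len sorted_hand
  match pvOuterA d sorted_hand length (PySem.List.pyRange length 0 (-1)) with
  | some w => w
  | none => "."

-- ===== PORT B =====
def pvSortedHand (hand : List (String × Int)) : String :=
  let d := PySem.Dict.ofList hand
  PySem.Str.join "" ((PySem.List.sorted d.keys (fun k => k) false).foldl
    (fun items key => items ++ PySem.List.pyRepeat [key] (d.getD key 0)) [])

def pvLexLt (p q : Int × Int) : Bool := p.1 < q.1 || (p.1 == q.1 && p.2 < q.2)

def pvStepB (sorted_hand : String) (best : Option ((Int × Int) × String)) (kv : String × String) :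
    Option ((Int × Int) × String) :=
  if 1 ≤ PySem.Str.len kv.1 then
    let offset := PySem.Str.find sorted_hand kv.1
    if 0 ≤ offset then
      let rank := (PySem.Str.len kv.1, -offset)
      match best with
      | none => some (rank, kv.2)
      | some b => if pvLexLt b.1 rank then some (rank, kv.2) else best
    else best
  else best

def pick_best_word_faster_alt (hand : List (String × Int)) (rearranged_word_list : List (String × String)) : String :=
  let sorted_hand := pvSortedHand hand
  match (PySem.Dict.ofList rearranged_word_list).items.foldl (pvStepB sorted_hand) none with
  | some best => best.2
  | none => "."

-- ===== PRECONDITION & SPEC =====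
def Spec_pick_best_word_faster (hand : List (String × Int)) (rearranged_word_list : List (String × String)) (out : String) : Prop := out = pick_best_word_faster_alt hand rearranged_word_list
instance (hand : List (String × Int)) (rearranged_word_list : List (String × String)) (out : String) : Decidable (Spec_pick_best_word_faster hand rearranged_word_list out) := by unfold Spec_pick_best_word_faster; infer_instance

-- ===== CLAIM (what is proved, stated in full; the proofs are below) =====
def Claim_equal_pick_best_word_faster : Prop := ∀ (hand : List (String × Int)) (rearranged_word_list : List (String × String)), Dom_pick_best_word_faster hand rearranged_word_list → Spec_pick_best_word_faster hand rearranged_word_list (pick_best_word_faster hand rearranged_word_list)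

-- ===== LEMMAS AND PROOFS =====

-- proof-only abbreviations: a dictionary key can win iff it is a nonempty infix of the sorted hand;
-- its rank is Python's tuple (len(key), -sorted_hand.find(key))
def pvGood (sh k : String) : Prop := k.toList ≠ [] ∧ k.toList <:+: sh.toList

def pvRank (sh k : String) : Int × Int := (PySem.Str.len k, -(PySem.Str.find sh k))

lemma pvLexLt_irrefl (p : Int × Int) : pvLexLt p p = false := by
  simp [pvLexLt]

lemma pvLexLt_asymm {p q : Int × Int} (h : pvLexLt p q = true) : pvLexLt q p = false := by
  obtain ⟨a, b⟩ := p
  obtain ⟨c, d⟩ := q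
  simp only [pvLexLt, Bool.or_eq_true, Bool.and_eq_true, decide_eq_true_eq, beq_iff_eq] at h
  simp only [pvLexLt, Bool.or_eq_false_iff, Bool.and_eq_false_iff, decide_eq_false_iff_not,
    beq_eq_false_iff_ne, ne_eq]
  omega

lemma pvGoodp_iff (sh k : String) :
    (1 ≤ PySem.Str.len k ∧ 0 ≤ PySem.Str.find sh k) ↔ pvGood sh k := by
  unfold pvGood
  rw [PySem.Str.len_eq]
  constructor
  · rintro ⟨h1, h2⟩
    refine ⟨?_, (PySem.Str.find_nonneg_iff sh k).mp h2⟩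
    intro hnil
    rw [hnil] at h1
    simp at h1
  · rintro ⟨h1, h2⟩
    refine ⟨?_, (PySem.Str.find_nonneg_iff sh k).mpr h2⟩
    have : 0 < k.toList.length := List.length_pos_iff.mpr h1
    omega

-- B's "sorted hand" equals A's
lemma pvSortedHand_eq (hand : List (String × Int)) :
    pvSortedHand hand = PySem.Str.join "" (pvDictToSortedList (PySem.Dict.ofList hand)) := by
  simp only [pvSortedHand, pvDictToSortedList, pvFlatten, PySem.List.foldl_append_eq_flatMap,
    List.flatMap_map, List.nil_append]

-- A's inner loop is a find? over the offsets
lemma pvInnerA_eq_find? (d : PySem.Dict String String) (sh : String) (size : Int) (offs : List Int) :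
    pvInnerA d sh size offs
      = (offs.find? (fun o => d.contains (PySem.Str.slice sh (some o) (some (size + o))))).map
          (fun o => d.getD (PySem.Str.slice sh (some o) (some (size + o))) "") := by
  induction offs with
  | nil => rfl
  | cons o rest ih =>
    simp only [pvInnerA, List.find?_cons]
    by_cases h : d.contains (PySem.Str.slice sh (some o) (some (size + o))) = true
    · simp [h]
    · simp only [Bool.not_eq_true] at h
      simp [h, ih]

-- find? on a strictly increasing list finds the least satisfying element
lemma pvFind?_min {p : Nat → Bool} {o : Nat} :
    ∀ {l : List Nat}, l.Pairwise (· < ·) → l.find? p = some o → ∀ i ∈ l, i < o → p i = false := by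
  intro l
  induction l with
  | nil => intro _ h; simp at h
  | cons a t ih =>
    intro hp hf i hi hio
    rcases List.pairwise_cons.mp hp with ⟨ha, ht⟩
    cases hpa : p a with
    | true =>
      rw [List.find?_cons_of_pos hpa] at hf
      have hao : a = o := Option.some.inj hf
      rcases List.mem_cons.mp hi with rfl | hit
      · exact absurd hio (by omega)
      · exact absurd hio (by have := ha i hit; omega)
    | false =>
      rw [List.find?_cons_of_neg (by simp [hpa])] at hf
      rcases List.mem_cons.mp hi with rfl | hit
      · exact hpa
      · exact ih ht hf i hit hio

-- the candidate substring of size n at offset j, as a character list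
lemma pvCand_toList (sh : String) (j n : Nat) :
    (PySem.Str.slice sh (some (j : Int)) (some ((n : Int) + (j : Int)))).toList
      = (sh.toList.drop j).take n := by
  rw [PySem.Str.toList_slice, PySem.Chars.slice_eq_listSlice, add_comm (n : Int) (j : Int),
    PySem.List.slice_natCast_add]

-- membership of a key in the dict
lemma pvMemItems_of_contains (d : PySem.Dict String String) {k : String} (h : d.contains k = true) :
    (k, d.getD k "") ∈ d.items := by
  have h1 : (d.get? k).isSome := by rw [← PySem.Dict.contains_eq_isSome_get?]; exact h
  rcases Option.isSome_iff_exists.mp h1 with ⟨v, hv⟩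
  rw [PySem.Dict.getD_of_get?_eq_some d "" hv]
  exact PySem.Dict.mem_items_of_get?_eq_some d hv

lemma pvContains_of_memItems (d : PySem.Dict String String) {k : String} {v : String}
    (h : (k, v) ∈ d.items) : d.contains k = true := by
  rw [PySem.Dict.contains_iff_mem_keys]
  have hkeys : d.keys = d.items.map Prod.fst := rfl
  rw [hkeys]
  exact List.mem_map.mpr ⟨(k, v), h, rfl⟩

-- a key k of length n that is a prefix of drop j IS the candidate at offset j
lemma pvCand_eq_key (sh k : String) {j n : Nat} (hn : k.toList.length = n)
    (hpre : k.toList <+: sh.toList.drop j) :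
    PySem.Str.slice sh (some (j : Int)) (some ((n : Int) + (j : Int))) = k := by
  apply String.toList_inj.mp
  rw [pvCand_toList, ← hn, ← List.prefix_iff_eq_take.mp hpre]

-- Python's find returns the first matching offset
lemma pvFind_eq (sh c : String) {j : Nat}
    (hpre : c.toList <+: sh.toList.drop j)
    (hmin : ∀ i : Nat, i < j → ¬ c.toList <+: sh.toList.drop i) :
    PySem.Str.find sh c = (j : Int) := by
  rw [PySem.Str.find_eq]
  have hinf : c.toList <:+: sh.toList := by
    rcases hpre with ⟨t, ht⟩
    exact ⟨sh.toList.take j, t, by rw [List.append_assoc, ht, List.take_append_drop]⟩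
  have hnn : 0 ≤ PySem.Chars.find sh.toList c.toList :=
    (PySem.Chars.find_nonneg_iff _ _).mpr hinf
  rcases PySem.Chars.find_spec hnn with ⟨hp, hm⟩
  rcases lt_trichotomy (PySem.Chars.find sh.toList c.toList).toNat j with h | h | h
  · exact absurd hp (hmin _ h)
  · omega
  · exact absurd hpre (hm j h)

-- ===== A-side characterisation: the nested loops return the value of the
-- (length, -offset)-maximal good key, or none when no key matches =====
lemma pvOuterA_char (d : PySem.Dict String String) (sh : String) :
    ∀ (m : Nat), m ≤ sh.toList.length →
    (∀ k v, (k, v) ∈ d.items → pvGood sh k → k.toList.length ≤ m) →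
    (pvOuterA d sh (sh.toList.length : Int) (PySem.List.pyRange (m : Int) 0 (-1)) = none
        ∧ (∀ k v, (k, v) ∈ d.items → ¬ pvGood sh k))
    ∨ (∃ c v, (c, v) ∈ d.items ∧ pvGood sh c
        ∧ pvOuterA d sh (sh.toList.length : Int) (PySem.List.pyRange (m : Int) 0 (-1)) = some v
        ∧ ∀ k w, (k, w) ∈ d.items → pvGood sh k → k ≠ c →
            pvLexLt (pvRank sh k) (pvRank sh c) = true) := by
  intro m
  induction m with
  | zero =>
    intro _ Hmax
    left
    constructor
    · rw [PySem.List.pyRange_neg_one_eq_nil (by norm_num)]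
      simp [pvOuterA]
    · intro k v hkv hg
      have h1 := Hmax k v hkv hg
      exact hg.1 (List.eq_nil_of_length_eq_zero (Nat.le_zero.mp h1))
  | succ m ih =>
    intro hm Hmax
    have hmle : m ≤ sh.toList.length := by omega
    have hcast : ((m + 1 : Nat) : Int) - 1 = (m : Int) := by push_cast; ring
    have hcons : PySem.List.pyRange ((m + 1 : Nat) : Int) 0 (-1)
        = ((m + 1 : Nat) : Int) :: PySem.List.pyRange (m : Int) 0 (-1) := by
      rw [PySem.List.pyRange_neg_one_cons (by exact_mod_cast Nat.succ_pos m), hcast]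
    rw [hcons]
    have hb : ((sh.toList.length : Int) - ((m + 1 : Nat) : Int) + 1)
        = ((sh.toList.length - m : Nat) : Int) := by push_cast; omega
    set p : Nat → Bool := fun j =>
      d.contains (PySem.Str.slice sh (some (j : Int)) (some (((m + 1 : Nat) : Int) + (j : Int)))) with hp
    have hinner : pvInnerA d sh ((m + 1 : Nat) : Int)
        (PySem.List.pyRange 0 ((sh.toList.length : Int) - ((m + 1 : Nat) : Int) + 1) 1)
        = ((List.range (sh.toList.length - m)).find? p).map
            (fun j => d.getD (PySem.Str.slice sh (some (j : Int)) (some (((m + 1 : Nat) : Int) + (j : Int)))) "") := by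
      rw [hb, PySem.List.pyRange_zero_natCast, pvInnerA_eq_find?, List.find?_map]
      cases hq : (List.range (sh.toList.length - m)).find?
          ((fun o => d.contains (PySem.Str.slice sh (some o) (some (((m + 1 : Nat) : Int) + o)))) ∘
            (fun k : Nat => (k : Int))) with
      | none =>
        rw [show (List.range (sh.toList.length - m)).find? p = none from hq]
        rfl
      | some j =>
        rw [show (List.range (sh.toList.length - m)).find? p = some j from hq]
        rfl
    cases hfind : (List.range (sh.toList.length - m)).find? p with
    | none =>
      have hstep : pvOuterA d sh (sh.toList.length : Int)
          (((m + 1 : Nat) : Int) :: PySem.List.pyRange (m : Int) 0 (-1))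
          = pvOuterA d sh (sh.toList.length : Int) (PySem.List.pyRange (m : Int) 0 (-1)) := by
        simp only [pvOuterA, hinner, hfind]
        rfl
      rw [hstep]
      apply ih hmle
      intro k v hkv hg
      by_contra hgt
      have hlen : k.toList.length = m + 1 := by have := Hmax k v hkv hg; omega
      rcases hg.2 with ⟨pre, suf, hps⟩
      have hdrop : sh.toList.drop pre.length = k.toList ++ suf := by
        rw [← hps, List.append_assoc, List.drop_left]
      have hpre : k.toList <+: sh.toList.drop pre.length := ⟨suf, hdrop.symm⟩
      have hLlen : pre.length + (m + 1) + suf.length = sh.toList.length := by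
        have hlps := congrArg List.length hps
        simp only [List.length_append, hlen] at hlps
        omega
      have hjN : pre.length < sh.toList.length - m := by omega
      have hpj : p pre.length = true := by
        simp only [hp]
        rw [pvCand_eq_key sh k hlen hpre]
        exact pvContains_of_memItems d hkv
      have := (List.find?_eq_none.mp hfind) _ (List.mem_range.mpr hjN)
      simp [hpj] at this
    | some j₀ =>
      right
      have hj₀N : j₀ < sh.toList.length - m := List.mem_range.mp (List.mem_of_find?_eq_some hfind)
      have hpj₀ : p j₀ = true := List.find?_some hfind
      have hmin : ∀ i, i < j₀ → p i = false := fun i hi =>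
        pvFind?_min List.pairwise_lt_range hfind i (List.mem_range.mpr (by omega)) hi
      set c := PySem.Str.slice sh (some (j₀ : Int)) (some (((m + 1 : Nat) : Int) + (j₀ : Int))) with hc
      have hclist : c.toList = (sh.toList.drop j₀).take (m + 1) := pvCand_toList sh j₀ (m + 1)
      have hclen : c.toList.length = m + 1 := by
        rw [hclist]
        simp only [List.length_take, List.length_drop]
        omega
      have hcont : d.contains c = true := by simpa only [hp, hc] using hpj₀
      have hcv := pvMemItems_of_contains d hcont
      have hcpre : c.toList <+: sh.toList.drop j₀ := by
        rw [hclist]; exact List.take_prefix _ _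
      have hcgood : pvGood sh c := by
        refine ⟨by intro h; rw [h] at hclen; simp at hclen, ?_⟩
        rcases hcpre with ⟨t, ht⟩
        exact ⟨sh.toList.take j₀, t, by rw [List.append_assoc, ht, List.take_append_drop]⟩
      have hminpre : ∀ i : Nat, i < j₀ → ¬ c.toList <+: sh.toList.drop i := by
        intro i hi hipre
        have hci : PySem.Str.slice sh (some (i : Int)) (some (((m + 1 : Nat) : Int) + (i : Int))) = c :=
          pvCand_eq_key sh c hclen hipre
        have hpi : p i = true := by simp only [hp]; rw [hci]; exact hcont
        rw [hmin i hi] at hpi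
        cases hpi
      have hfc : PySem.Str.find sh c = (j₀ : Int) := pvFind_eq sh c hcpre hminpre
      refine ⟨c, d.getD c "", hcv, hcgood, ?_, ?_⟩
      · simp only [pvOuterA, hinner, hfind]
        rfl
      · intro k w hkw hgk hne
        have hlek := Hmax k w hkw hgk
        have hlenc : PySem.Str.len c = ((m + 1 : Nat) : Int) := by
          rw [PySem.Str.len_eq, hclen]
        by_cases hsz : k.toList.length = m + 1
        · have hknn : 0 ≤ PySem.Str.find sh k := (PySem.Str.find_nonneg_iff sh k).mpr hgk.2
          have hknn' : 0 ≤ PySem.Chars.find sh.toList k.toList := by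
            rw [PySem.Str.find_eq] at hknn; exact hknn
          rcases PySem.Chars.find_spec hknn' with ⟨hkpre, _⟩
          have hlenle := hkpre.length_le
          rw [List.length_drop, hsz] at hlenle
          have hfkle : PySem.Chars.find sh.toList k.toList ≤ (sh.toList.length : Int) :=
            PySem.Chars.find_le_length _ _
          have hfkN : (PySem.Chars.find sh.toList k.toList).toNat < sh.toList.length - m := by omega
          have hpk : p (PySem.Chars.find sh.toList k.toList).toNat = true := by
            simp only [hp]
            rw [pvCand_eq_key sh k hsz hkpre]
            exact pvContains_of_memItems d hkw
          have h1 : ¬ (PySem.Chars.find sh.toList k.toList).toNat < j₀ := by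
            intro h
            rw [hmin _ h] at hpk
            cases hpk
          have h2 : (PySem.Chars.find sh.toList k.toList).toNat ≠ j₀ := by
            intro he
            apply hne
            have hck := pvCand_eq_key sh k hsz (he ▸ hkpre)
            rw [hc]
            exact hck.symm
          have hfkval : PySem.Str.find sh k
              = (((PySem.Chars.find sh.toList k.toList).toNat : Nat) : Int) := by
            rw [PySem.Str.find_eq, Int.toNat_of_nonneg hknn']
          unfold pvRank
          rw [hfc, hfkval, hlenc, PySem.Str.len_eq, hsz]
          simp only [pvLexLt, Bool.or_eq_true, Bool.and_eq_true, decide_eq_true_eq, beq_iff_eq]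
          right
          constructor
          · trivial
          · omega
        · have hlt : k.toList.length < m + 1 := by omega
          unfold pvRank
          rw [hlenc, PySem.Str.len_eq]
          simp only [pvLexLt, Bool.or_eq_true, Bool.and_eq_true, decide_eq_true_eq, beq_iff_eq]
          left
          omega

-- ===== B-side characterisation =====
lemma pvStepB_eq (sh : String) (acc : Option ((Int × Int) × String)) (kv : String × String) :
    pvStepB sh acc kv =
      if (1 ≤ PySem.Str.len kv.1 ∧ 0 ≤ PySem.Str.find sh kv.1) then
        match acc with
        | none => some (pvRank sh kv.1, kv.2)
        | some b => if pvLexLt b.1 (pvRank sh kv.1) then some (pvRank sh kv.1, kv.2) else acc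
      else acc := by
  unfold pvStepB pvRank
  by_cases h1 : 1 ≤ PySem.Str.len kv.1
  · by_cases h2 : 0 ≤ PySem.Str.find sh kv.1
    · rw [if_pos h1, if_pos h2, if_pos ⟨h1, h2⟩]
    · rw [if_pos h1, if_neg h2, if_neg (fun hh => h2 hh.2)]
  · rw [if_neg h1, if_neg (fun hh => h1 hh.1)]

lemma pvFoldB_id (sh : String) (l : List (String × String))
    (h : ∀ kv ∈ l, ¬ (1 ≤ PySem.Str.len kv.1 ∧ 0 ≤ PySem.Str.find sh kv.1))
    (acc : Option ((Int × Int) × String)) :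
    l.foldl (pvStepB sh) acc = acc := by
  induction l generalizing acc with
  | nil => rfl
  | cons kv t ih =>
    have hstep : pvStepB sh acc kv = acc := by
      rw [pvStepB_eq, if_neg (h kv (List.mem_cons_self))]
    rw [List.foldl_cons, hstep]
    exact ih (fun x hx => h x (List.mem_cons_of_mem _ hx)) acc

lemma pvFoldB_keep (sh : String) (R : Int × Int) (v : String) :
    ∀ (l : List (String × String)),
    (∀ kv ∈ l, (1 ≤ PySem.Str.len kv.1 ∧ 0 ≤ PySem.Str.find sh kv.1) →
      pvLexLt R (pvRank sh kv.1) = false) →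
    l.foldl (pvStepB sh) (some (R, v)) = some (R, v) := by
  intro l
  induction l with
  | nil => intro _; rfl
  | cons kv t ih =>
    intro h
    have hstep : pvStepB sh (some (R, v)) kv = some (R, v) := by
      rw [pvStepB_eq]
      by_cases hg : (1 ≤ PySem.Str.len kv.1 ∧ 0 ≤ PySem.Str.find sh kv.1)
      · rw [if_pos hg]
        show (if pvLexLt R (pvRank sh kv.1) then some (pvRank sh kv.1, kv.2) else some (R, v))
            = some (R, v)
        rw [h kv List.mem_cons_self hg]
        simp
      · rw [if_neg hg]
    rw [List.foldl_cons, hstep]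
    exact ih (fun x hx => h x (List.mem_cons_of_mem _ hx))

lemma pvFoldB_main (sh : String) (c v : String) :
    ∀ (l : List (String × String)), (l.map Prod.fst).Nodup → (c, v) ∈ l →
    (1 ≤ PySem.Str.len c ∧ 0 ≤ PySem.Str.find sh c) →
    (∀ kv ∈ l, (1 ≤ PySem.Str.len kv.1 ∧ 0 ≤ PySem.Str.find sh kv.1) → kv.1 ≠ c →
        pvLexLt (pvRank sh kv.1) (pvRank sh c) = true) →
    ∀ acc : Option ((Int × Int) × String),
      (acc = none ∨ ∃ p u, acc = some (p, u) ∧ pvLexLt p (pvRank sh c) = true) →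
      l.foldl (pvStepB sh) acc = some (pvRank sh c, v) := by
  intro l
  induction l with
  | nil =>
    intro _ hmem
    simp at hmem
  | cons kv t ih =>
    intro hnd hmem hgc hmax acc hacc
    have hnd' : (t.map Prod.fst).Nodup := (List.nodup_cons.mp hnd).2
    have hhead : kv.1 ∉ t.map Prod.fst := (List.nodup_cons.mp hnd).1
    by_cases hk : kv.1 = c
    · have hkv : kv = (c, v) := by
        rcases List.mem_cons.mp hmem with h | h
        · exact h.symm
        · exact absurd (hk ▸ List.mem_map.mpr ⟨(c, v), h, rfl⟩) hhead
      subst hkv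
      have hstep : pvStepB sh acc (c, v) = some (pvRank sh c, v) := by
        rw [pvStepB_eq, if_pos hgc]
        rcases hacc with rfl | ⟨p, u, rfl, hlt⟩
        · rfl
        · show (if pvLexLt p (pvRank sh c) then some (pvRank sh c, v) else some (p, u))
              = some (pvRank sh c, v)
          rw [hlt]
          simp
      rw [List.foldl_cons, hstep]
      apply pvFoldB_keep
      intro x hx hgx
      by_cases hxc : x.1 = c
      · rw [hxc]
        exact pvLexLt_irrefl _
      · exact pvLexLt_asymm (hmax x (List.mem_cons_of_mem _ hx) hgx hxc)
    · have hmem' : (c, v) ∈ t := by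
        rcases List.mem_cons.mp hmem with h | h
        · exact absurd (congrArg Prod.fst h).symm hk
        · exact h
      rw [List.foldl_cons]
      apply ih hnd' hmem' hgc (fun x hx hgx hxc => hmax x (List.mem_cons_of_mem _ hx) hgx hxc)
      rw [pvStepB_eq]
      by_cases hg : (1 ≤ PySem.Str.len kv.1 ∧ 0 ≤ PySem.Str.find sh kv.1)
      · rw [if_pos hg]
        have hlt := hmax kv List.mem_cons_self hg hk
        rcases hacc with rfl | ⟨p, u, rfl, hplt⟩
        · exact Or.inr ⟨_, _, rfl, hlt⟩
        · by_cases hrep : pvLexLt p (pvRank sh kv.1) = true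
          · refine Or.inr ⟨pvRank sh kv.1, kv.2, ?_, hlt⟩
            show (if pvLexLt p (pvRank sh kv.1) then some (pvRank sh kv.1, kv.2) else some (p, u))
                = some (pvRank sh kv.1, kv.2)
            rw [hrep]
            simp
          · refine Or.inr ⟨p, u, ?_, hplt⟩
            show (if pvLexLt p (pvRank sh kv.1) then some (pvRank sh kv.1, kv.2) else some (p, u))
                = some (p, u)
            rw [Bool.not_eq_true] at hrep
            rw [hrep]
            simp
      · rw [if_neg hg]
        exact hacc

-- ===== VERDICT (by name: the statement is the Claim_ definition above) =====
theorem pick_best_word_faster_spec : Claim_equal_pick_best_word_faster := by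
  intro hand rwl _
  unfold Spec_pick_best_word_faster
  simp only [pick_best_word_faster, pick_best_word_faster_alt, pvSortedHand_eq]
  set d := PySem.Dict.ofList rwl with hd
  set sh := PySem.Str.join "" (pvDictToSortedList (PySem.Dict.ofList hand)) with hsh
  rw [PySem.Str.len_eq]
  have hnd : d.keys.Nodup := PySem.Dict.nodup_keys_ofList rwl
  have hndm : (d.items.map Prod.fst).Nodup := hnd
  have Hmax : ∀ k v, (k, v) ∈ d.items → pvGood sh k → k.toList.length ≤ sh.toList.length :=
    fun k v _ hg => hg.2.length_le
  rcases pvOuterA_char d sh sh.toList.length le_rfl Hmax with ⟨hnone, hng⟩ | ⟨c, v, hcv, hgc, hsome, hmax⟩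
  · rw [hnone, pvFoldB_id sh d.items
      (fun kv hkv hgp => hng kv.1 kv.2 (by rw [Prod.mk.eta]; exact hkv) ((pvGoodp_iff sh kv.1).mp hgp))
      none]
  · rw [hsome, pvFoldB_main sh c v d.items hndm hcv ((pvGoodp_iff sh c).mpr hgc)
      (fun kv hkv hgp hne => hmax kv.1 kv.2 (by rw [Prod.mk.eta]; exact hkv) ((pvGoodp_iff sh kv.1).mp hgp) hne)
      none (Or.inl rfl)]
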